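-- pv_equiv track=rewrite | github.com/fenixguard/candyshop_api | application/apis/utils.py | get_min_avg_time
-- ===== SOURCE A (Python) =====
-- def get_min_avg_time(assign_complete_times: dict) -> int:
--     all_mins = list()
--     for key, value in assign_complete_times.items():
--         min_for_region = 0
--         count = 0
--         for i, (assign, complete) in enumerate(value):
--             if i == 0:
--                 min_for_region += complete - assign
--                 count += 1
--             else:
--                 min_for_region += complete - value[i - 1][1]
--                 count += 1
--         all_mins.append(min_for_region // count)
--
--     return min(all_mins)
-- ===== SOURCE B (Python) =====
-- def get_min_avg_time(assign_complete_times: dict) -> int: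
--     # The per-region sum telescopes to last_complete - first_assign,
--     # so no inner loop is needed; keep a running minimum.
--     best = None
--     for value in assign_complete_times.values():
--         avg = (value[-1][1] - value[0][0]) // len(value)
--         if best is None or avg < best:
--             best = avg
--     return best
-- ===== Notes on version B (the rewrite author's own statement) =====
-- stated objective: simpler
-- what changed: The inner accumulation telescopes to last_complete - first_assign, so B drops the inner loop entirely and keeps a running minimum instead of building a list of averages and calling min.
import Mathlib
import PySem

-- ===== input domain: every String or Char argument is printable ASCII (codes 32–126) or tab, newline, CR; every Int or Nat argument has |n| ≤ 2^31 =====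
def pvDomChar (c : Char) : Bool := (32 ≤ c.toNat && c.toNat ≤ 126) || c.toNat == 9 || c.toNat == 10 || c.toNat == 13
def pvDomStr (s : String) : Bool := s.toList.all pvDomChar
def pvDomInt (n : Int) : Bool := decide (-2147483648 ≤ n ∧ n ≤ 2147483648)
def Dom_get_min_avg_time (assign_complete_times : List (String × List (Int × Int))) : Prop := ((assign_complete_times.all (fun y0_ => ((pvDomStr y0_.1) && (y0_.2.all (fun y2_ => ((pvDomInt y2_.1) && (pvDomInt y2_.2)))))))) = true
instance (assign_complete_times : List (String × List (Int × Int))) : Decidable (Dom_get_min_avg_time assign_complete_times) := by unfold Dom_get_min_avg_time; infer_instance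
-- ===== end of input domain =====

-- B replaces A's inner accumulation (which telescopes to last_complete - first_assign)
-- by a direct per-region formula with a running minimum instead of a list of averages (simpler).


-- ===== PORT A =====
-- A's inner loop: for i, (assign, complete) in enumerate(value): …
-- value[i - 1] is ported as pyGet?; the .getD default is unreachable for i ≥ 1 inside a region.
def pvInnerA (value : List (Int × Int)) : Int × Int :=
  (PySem.List.enumerate value 0).foldl
    (fun (st : Int × Int) p =>
      if p.1 == 0 then (st.1 + (p.2.2 - p.2.1), st.2 + 1)
      else (st.1 + (p.2.2 - ((PySem.List.pyGet? value (p.1 - 1)).getD (0, 0)).2), st.2 + 1))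
    (0, 0)

def get_min_avg_time (assign_complete_times : List (String × List (Int × Int))) : Int :=
  let all_mins := assign_complete_times.foldl
    (fun (acc : List Int) kv =>
      let r := pvInnerA kv.2
      acc ++ [PySem.Int.floordiv r.1 r.2]) []
  (PySem.List.min? all_mins (fun y => y)).getD 0   -- Pre_ guarantees all_mins ≠ [] (Python min([]) raises ValueError)

-- ===== PORT B =====
def get_min_avg_time_alt (assign_complete_times : List (String × List (Int × Int))) : Int :=
  (assign_complete_times.foldl
    (fun (best : Option Int) kv =>
      let value := kv.2
      let avg := PySem.Int.floordiv
        (((PySem.List.pyGet? value (-1)).getD (0, 0)).2 - ((PySem.List.pyGet? value 0).getD (0, 0)).1)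
        (value.length : Int)
      match best with
      | none => some avg
      | some b => if avg < b then some avg else some b)
    none).getD 0   -- Pre_ guarantees a nonempty dict, so best ends as some _

-- ===== PRECONDITION & SPEC =====
-- Pre_ excludes: (a) the empty dict (Python A raises ValueError at min([])) and empty regions
-- (Python A raises ZeroDivisionError); (b) lists with duplicate keys, because Python's dict
-- construction collapses them (last value wins) while the association-list ports iterate every
-- entry — on such inputs both Pythons still return, and return the same value.
def Pre_get_min_avg_time (assign_complete_times : List (String × List (Int × Int))) : Prop :=
  assign_complete_times ≠ [] ∧
  (assign_complete_times.map Prod.fst).Nodup ∧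
  ∀ kv ∈ assign_complete_times, kv.2 ≠ []

instance (assign_complete_times : List (String × List (Int × Int))) : Decidable (Pre_get_min_avg_time assign_complete_times) := by
  unfold Pre_get_min_avg_time; infer_instance

def pvWitness_get_min_avg_time : (List (String × List (Int × Int))) :=
  [("a", [(0, 10), (12, 20)]), ("b", [(1, 4)])]

def Spec_get_min_avg_time (assign_complete_times : List (String × List (Int × Int))) (out : Int) : Prop := out = get_min_avg_time_alt assign_complete_times
instance (assign_complete_times : List (String × List (Int × Int))) (out : Int) : Decidable (Spec_get_min_avg_time assign_complete_times out) := by unfold Spec_get_min_avg_time; infer_instance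

-- ===== CLAIM (what is proved, stated in full; the proofs are below) =====
def Claim_equal_get_min_avg_time : Prop := ∀ (assign_complete_times : List (String × List (Int × Int))), Dom_get_min_avg_time assign_complete_times → Pre_get_min_avg_time assign_complete_times → Spec_get_min_avg_time assign_complete_times (get_min_avg_time assign_complete_times)

-- ===== LEMMAS AND PROOFS =====

-- A's inner loop telescopes: on a nonempty region it returns (last complete − first assign, length)
theorem pvInnerA_eq (v : List (Int × Int)) (h : v ≠ []) :
    pvInnerA v = ((v.getLastD (0, 0)).2 - (v.headD (0, 0)).1, (v.length : Int)) := by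
  induction v using List.reverseRecOn with
  | nil => simp at h
  | append_singleton w x ih =>
    rcases List.eq_nil_or_concat w with hw | _
    · subst hw
      simp [pvInnerA, PySem.List.enumerate]
    · have hw : w ≠ [] := by rintro rfl; simp_all
      unfold pvInnerA
      rw [PySem.List.enumerate_append]
      rw [List.foldl_append]
      have hcongr : (PySem.List.enumerate w 0).foldl
          (fun (st : Int × Int) p =>
            if p.1 == 0 then (st.1 + (p.2.2 - p.2.1), st.2 + 1)
            else (st.1 + (p.2.2 - ((PySem.List.pyGet? (w ++ [x]) (p.1 - 1)).getD (0, 0)).2), st.2 + 1)) (0,0)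
          = pvInnerA w := by
        unfold pvInnerA
        apply PySem.List.foldl_congr_mem
        intro acc p hp
        rcases (PySem.List.mem_enumerate_iff _ _ _).1 hp with ⟨k, hk, rfl⟩
        simp only [zero_add]
        by_cases hk0 : k = 0
        · subst hk0; simp
        · have : ((k : Int) == 0) = false := by simp; omega
          simp only [this, Bool.false_eq_true]
          have hcast : (k : Int) - 1 = ((k - 1 : Nat) : Int) := by omega
          rw [hcast, PySem.List.pyGet?_natCast, PySem.List.pyGet?_natCast,
              List.getElem?_append_left (by omega)]
      rw [hcongr, ih hw]
      have hlen : ((w.length : Int) == 0) = false := by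
        have hpos : 0 < w.length := List.length_pos_iff.2 hw
        simp; omega
      simp only [PySem.List.enumerate, List.foldl_cons, List.foldl_nil, zero_add, hlen,
        Bool.false_eq_true, if_false]
      have hcast : (w.length : Int) - 1 = ((w.length - 1 : Nat) : Int) := by
        have hpos : 0 < w.length := List.length_pos_iff.2 hw
        omega
      rw [hcast, PySem.List.pyGet?_natCast, List.getElem?_append_left (by
        have := List.length_pos_iff.2 hw; omega)]
      have hlast : w[w.length - 1]? = w.getLast? := List.getLast?_eq_getElem?.symm
      rw [hlast]
      have : w.getLast? = some (w.getLastD (0,0)) := by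
        cases w with
        | nil => exact absurd rfl hw
        | cons a t => simp [List.getLastD_eq_getLast?, List.getLast?_eq_getElem?]
      rw [this]
      have hhead : (w ++ [x]).headD ((0:Int),(0:Int)) = w.headD (0,0) := by
        cases w with
        | nil => exact absurd rfl hw
        | cons a t => rfl
      have hlastD : (w ++ [x]).getLastD ((0:Int),(0:Int)) = x := by
        simp [List.getLastD_eq_getLast?]
      rw [hhead, hlastD]
      simp

-- the telescoped per-region average
def pvAvg (v : List (Int × Int)) : Int :=
  PySem.Int.floordiv ((v.getLastD (0, 0)).2 - (v.headD (0, 0)).1) (v.length : Int)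

theorem pv_foldl_append (xs : List (String × List (Int × Int))) (f : List (Int × Int) → Int) :
    ∀ (acc : List Int),
      xs.foldl (fun (acc : List Int) kv => acc ++ [f kv.2]) acc = acc ++ xs.map (fun kv => f kv.2) := by
  induction xs with
  | nil => intro acc; simp
  | cons a t ih => intro acc; simp [ih]

theorem pvA_eq (xs : List (String × List (Int × Int))) (h : ∀ kv ∈ xs, kv.2 ≠ []) :
    get_min_avg_time xs = (PySem.List.min? (xs.map (fun kv => pvAvg kv.2)) (fun y => y)).getD 0 := by
  unfold get_min_avg_time
  rw [pv_foldl_append xs (fun v => PySem.Int.floordiv (pvInnerA v).1 (pvInnerA v).2) []]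
  simp only [List.nil_append]
  congr 1
  apply congrFun (congrArg _ ?_) _
  apply List.map_congr_left
  intro kv hkv
  rw [pvInnerA_eq kv.2 (h kv hkv)]
  rfl

theorem pvB_eq (xs : List (String × List (Int × Int))) (h : ∀ kv ∈ xs, kv.2 ≠ []) :
    get_min_avg_time_alt xs
      = ((xs.map (fun kv => pvAvg kv.2)).foldl (fun best a =>
          match best with
          | none => some a
          | some b => if a < b then some a else some b) (none : Option Int)).getD 0 := by
  unfold get_min_avg_time_alt
  rw [List.foldl_map]
  congr 1
  apply PySem.List.foldl_congr_mem
  intro best kv hkv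
  have hne := h kv hkv
  have hlast : PySem.List.pyGet? kv.2 (-1) = some (kv.2.getLastD (0,0)) := by
    rw [PySem.List.pyGet?_neg_one]
    cases h2 : kv.2 with
    | nil => exact absurd h2 hne
    | cons a t =>
      rw [List.getLastD_eq_getLast?, List.getLast?_eq_getElem?]
      simp
  have h0 : PySem.List.pyGet? kv.2 0 = some (kv.2.headD (0,0)) := by
    cases h2 : kv.2 with
    | nil => exact absurd h2 hne
    | cons a t => simp
  simp only [hlast, h0, Option.getD_some]
  rfl

theorem pv_runmin (t : List Int) : ∀ (b : Int),
    t.foldl (fun best a =>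
      match best with
      | none => some a
      | some b => if a < b then some a else some b) (some b) = some (t.foldl min b) := by
  induction t with
  | nil => intro b; simp
  | cons a s ih =>
    intro b
    have hstep : (match some b with
        | none => some a
        | some c => if a < c then some a else some c)
        = some (if a < b then a else b) := by by_cases hc : a < b <;> simp [hc]
    rw [List.foldl_cons, hstep, List.foldl_cons]
    rcases lt_or_ge a b with hc | hc
    · rw [if_pos hc, ih, min_eq_right hc.le]
    · rw [if_neg (not_lt.2 hc), ih, min_eq_left hc]

-- ===== VERDICT (by name: the statement is the Claim_ definition above) =====
theorem get_min_avg_time_spec : Claim_equal_get_min_avg_time := by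
  intro xs _ hpre
  obtain ⟨hne, _, hval⟩ := hpre
  show get_min_avg_time xs = get_min_avg_time_alt xs
  rw [pvA_eq xs hval, pvB_eq xs hval]
  cases xs with
  | nil => exact absurd rfl hne
  | cons k t =>
    simp only [List.map_cons]
    rw [PySem.List.min?_id_cons, List.foldl_cons, pv_runmin]
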